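-- pv_equiv track=rewrite | github.com/aw0605/CodingTest | 프로그래머스/1/17681. ［1차］ 비밀지도/［1차］ 비밀지도.py | solution
-- ===== SOURCE A (Python) =====
-- def solution(n, arr1, arr2):
--     answer = []
--     for i,j in zip(arr1, arr2):
--         v12 = bin(i|j)[2:].zfill(n)
--         v12 = v12.replace("1", "#")
--         v12 = v12.replace("0", " ")
--         answer.append(v12)
--     return answer
-- ===== SOURCE B (Python) =====
-- def solution(n, arr1, arr2):
--     answer = []
--     for i, j in zip(arr1, arr2):
--         v = i | j
--         row = []
--         while v:
--             row.append('#' if v & 1 else ' ')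
--             v >>= 1
--         row += ' ' * (max(n, 1) - len(row))
--         answer.append(''.join(reversed(row)))
--     return answer
-- ===== Notes on version B (the rewrite author's own statement) =====
-- stated objective: alternative
-- what changed: Replaces A's string pipeline bin()/[2:]/zfill/replace/replace by direct bit arithmetic (extract bits LSB-first with & 1 and >>= 1, pad with spaces to max(n,1), reverse-join). Pre_ restricts to the task's natural domain of nonnegative zipped row values: on a negative i|j, B's bit-extraction loop does not terminate, while A still returns a row containing a stray 'b' from bin(i|j)[2:].
-- outside the precondition, e.g. on solution(2, [-1], [1]): A returns ['b#'], B does not finish within the time limit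
import Mathlib
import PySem

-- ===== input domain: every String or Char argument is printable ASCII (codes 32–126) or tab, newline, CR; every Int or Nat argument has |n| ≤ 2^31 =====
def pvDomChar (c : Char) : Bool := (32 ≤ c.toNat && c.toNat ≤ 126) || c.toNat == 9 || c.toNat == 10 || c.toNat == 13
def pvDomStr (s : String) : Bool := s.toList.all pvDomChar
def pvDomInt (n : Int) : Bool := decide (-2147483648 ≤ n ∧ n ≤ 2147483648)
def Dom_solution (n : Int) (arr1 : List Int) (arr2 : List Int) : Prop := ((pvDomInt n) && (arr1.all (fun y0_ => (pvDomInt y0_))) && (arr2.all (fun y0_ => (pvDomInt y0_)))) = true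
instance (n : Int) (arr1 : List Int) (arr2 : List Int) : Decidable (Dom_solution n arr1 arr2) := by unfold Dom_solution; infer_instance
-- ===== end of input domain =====

-- B renders each row by direct bit arithmetic (LSB-first extraction, space padding, reverse)
-- instead of A's bin()/[2:]/zfill/replace string pipeline; alternative decomposition, same cost.

-- ===== PORT A =====
def solution (n : Int) (arr1 : List Int) (arr2 : List Int) : List String :=
  (arr1.zip arr2).foldl (fun answer p =>
    let v12a := PySem.Chars.slice (PySem.Int.toBinChars0b (PySem.Int.bor p.1 p.2)) (some 2) none
    let v12b := PySem.Chars.zfill v12a n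
    let v12c := PySem.Chars.replace v12b ['1'] ['#']
    let v12d := PySem.Chars.replace v12c ['0'] [' ']
    answer ++ [String.mk v12d]) []

-- ===== PORT B =====
-- the 'while v:' loop of Source B (stops here for v ≤ 0; Python's loop does not terminate on a
-- negative v — such inputs are excluded by Pre_solution)
def bitsLSB (v : Int) : List Char :=
  if h : 0 < v then
    (if PySem.Int.band v 1 == 1 then '#' else ' ') :: bitsLSB (v >>> (1 : Nat))
  else []
  termination_by v.toNat
  decreasing_by
    obtain ⟨m, rfl⟩ : ∃ m : Nat, v = (m : Int) := ⟨v.toNat, (Int.toNat_of_nonneg h.le).symm⟩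
    have : (m : Int) >>> (1 : Nat) = ((m >>> 1 : Nat) : Int) := by simp
    simp only [this, Int.toNat_natCast]
    omega

def solution_alt (n : Int) (arr1 : List Int) (arr2 : List Int) : List String :=
  (arr1.zip arr2).foldl (fun answer p =>
    let v := PySem.Int.bor p.1 p.2
    let row := bitsLSB v
    let row := row ++ List.replicate (max n 1 - (row.length : Int)).toNat ' '
    answer ++ [String.mk row.reverse]) []

-- ===== PRECONDITION & SPEC =====
-- Pre_ restricts to the task's natural domain of nonnegative zipped row values: on a negative
-- i|j, B's bit-extraction loop does not terminate, while A still returns a row containing a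
-- stray 'b' from bin(i|j)[2:].
def Pre_solution (n : Int) (arr1 : List Int) (arr2 : List Int) : Prop :=
  ∀ p ∈ arr1.zip arr2, 0 ≤ p.1 ∧ 0 ≤ p.2
instance (n : Int) (arr1 : List Int) (arr2 : List Int) : Decidable (Pre_solution n arr1 arr2) := by
  unfold Pre_solution; infer_instance

def pvWitness_solution : Int × List Int × List Int := (5, [9, 20, 28, 18, 11], [30, 1, 21, 17, 28])

def Spec_solution (n : Int) (arr1 : List Int) (arr2 : List Int) (out : List String) : Prop := out = solution_alt n arr1 arr2
instance (n : Int) (arr1 : List Int) (arr2 : List Int) (out : List String) : Decidable (Spec_solution n arr1 arr2 out) := by unfold Spec_solution; infer_instance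

-- ===== CLAIM (what is proved, stated in full; the proofs are below) =====
def Claim_equal_solution : Prop := ∀ (n : Int) (arr1 : List Int) (arr2 : List Int), Dom_solution n arr1 arr2 → Pre_solution n arr1 arr2 → Spec_solution n arr1 arr2 (solution n arr1 arr2)

-- ===== LEMMAS AND PROOFS =====

-- binary digits of a natural number, MSB first (proof-side model of Nat.toDigits 2)
def binDigits (m : Nat) : List Char :=
  if m < 2 then [Nat.digitChar m] else binDigits (m / 2) ++ [Nat.digitChar (m % 2)]

lemma toDigitsCore_two (f : Nat) : ∀ (m : Nat) (acc : List Char), m < f →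
    Nat.toDigitsCore 2 f m acc = binDigits m ++ acc := by
  induction f with
  | zero => intro m acc h; omega
  | succ f ih =>
    intro m acc h
    rw [Nat.toDigitsCore]
    by_cases h2 : m < 2
    · have h0 : m / 2 = 0 := by omega
      have hm2 : m % 2 = m := by omega
      rw [if_pos h0, binDigits, if_pos h2, hm2]
      simp
    · have h0 : ¬ m / 2 = 0 := by omega
      rw [if_neg h0, ih (m / 2) _ (by omega)]
      conv_rhs => rw [binDigits]
      rw [if_neg h2]
      simp

lemma toDigits_two (m : Nat) : Nat.toDigits 2 m = binDigits m := by
  rw [Nat.toDigits, toDigitsCore_two (m + 1) m [] (by omega)]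
  simp

lemma binDigits_mem (m : Nat) : ∀ c ∈ binDigits m, c = '0' ∨ c = '1' := by
  induction m using binDigits.induct with
  | case1 m h =>
    rw [binDigits]
    simp only [if_pos h, List.mem_singleton]
    intro c hc
    interval_cases m <;> simp_all [Nat.digitChar]
  | case2 m h ih =>
    rw [binDigits]
    simp only [if_neg h, List.mem_append, List.mem_singleton]
    rintro c (hc | rfl)
    · exact ih c hc
    · have : m % 2 = 0 ∨ m % 2 = 1 := by omega
      rcases this with h1 | h1 <;> simp [h1, Nat.digitChar]

lemma binDigits_ne_nil (m : Nat) : binDigits m ≠ [] := by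
  rw [binDigits]; split <;> simp

lemma binDigits_length_pos (m : Nat) : 0 < (binDigits m).length :=
  List.length_pos_iff.mpr (binDigits_ne_nil m)

-- single-character replace is a map
lemma replace_go_single (a b : Char) : ∀ (f : Nat) (l acc : List Char), l.length ≤ f →
    PySem.Chars.replace.go [a] [b] f l acc
      = acc.reverse ++ l.map (fun c => if c = a then b else c) := by
  intro f
  induction f with
  | zero =>
    intro l acc h
    have : l = [] := by cases l <;> simp_all
    subst this
    simp [PySem.Chars.replace.go]
  | succ f ih =>
    intro l acc h
    cases l with
    | nil => simp [PySem.Chars.replace.go]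
    | cons c t =>
      rw [PySem.Chars.replace.go]
      by_cases hc : c = a
      · subst hc
        have hp : List.isPrefixOf [c] (c :: t) = true := by simp [List.isPrefixOf]
        simp only [hp, if_pos]
        rw [ih _ _ (by simpa using Nat.le_of_succ_le_succ h)]
        simp
      · have hp : List.isPrefixOf [a] (c :: t) = false := by
          simp [List.isPrefixOf, hc]
          intro h'; exact absurd h'.symm hc
        simp only [hp]
        rw [if_neg (by simp), ih _ _ (by simpa using Nat.le_of_succ_le_succ h)]
        simp [hc]

lemma replace_single (s : List Char) (a b : Char) :
    PySem.Chars.replace s [a] [b] = s.map (fun c => if c = a then b else c) := by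
  rw [PySem.Chars.replace]
  simp only [List.isEmpty_cons, if_false, Bool.false_eq_true]
  rw [replace_go_single a b s.length s [] le_rfl]
  simp

-- the final substitution '1' ↦ '#', '0' ↦ ' '
def bitMap (c : Char) : Char := if c = '1' then '#' else if c = '0' then ' ' else c

lemma replace_replace (s : List Char) :
    PySem.Chars.replace (PySem.Chars.replace s ['1'] ['#']) ['0'] [' '] = s.map bitMap := by
  rw [replace_single, replace_single, List.map_map]
  apply List.map_congr_left
  intro c _
  by_cases h1 : c = '1' <;> by_cases h0 : c = '0' <;> simp_all [bitMap]

lemma shift_one_nat (m : Nat) : ((m : Int) >>> (1 : Nat)) = ((m / 2 : Nat) : Int) := by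
  have : (m : Int) >>> (1 : Nat) = ((m >>> 1 : Nat) : Int) := by simp
  rw [this, Nat.shiftRight_one]

lemma band_one_nat (m : Nat) : PySem.Int.band (m : Int) 1 = ((m % 2 : Nat) : Int) := by
  simp [PySem.Int.band, Nat.and_one_is_mod]

lemma bitsLSB_zero : bitsLSB (0 : Int) = [] := by
  rw [bitsLSB]; simp

lemma bitsLSB_step (m : Nat) (hm : 0 < m) :
    bitsLSB (m : Int) = (if m % 2 = 1 then '#' else ' ') :: bitsLSB ((m / 2 : Nat) : Int) := by
  rw [bitsLSB, dif_pos (by exact_mod_cast hm), shift_one_nat, band_one_nat]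
  congr 1
  by_cases h : m % 2 = 1
  · simp [h]
  · have h0 : m % 2 = 0 := by omega
    simp [h0, h]

-- B's LSB-first bit list is the reverse of the substituted digit string (for positive m)
lemma bitsLSB_eq (m : Nat) (hm : 0 < m) :
    bitsLSB (m : Int) = ((binDigits m).map bitMap).reverse := by
  induction m using Nat.strong_induction_on with
  | _ m ih =>
    by_cases h2 : m < 2
    · have : m = 1 := by omega
      subst this
      have hb : binDigits 1 = ['1'] := by rw [binDigits]; norm_num [Nat.digitChar]
      rw [bitsLSB_step 1 (by omega), show ((1 / 2 : Nat) : Int) = (0 : Int) from rfl,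
        bitsLSB_zero, hb]
      simp [bitMap]
    · rw [bitsLSB_step m (by omega), ih (m / 2) (by omega) (by omega)]
      conv_rhs => rw [binDigits]
      rw [if_neg h2]
      simp only [List.map_append, List.reverse_append, List.map_cons, List.map_nil,
        List.reverse_cons, List.reverse_nil, List.nil_append]
      congr 1
      have : m % 2 = 0 ∨ m % 2 = 1 := by omega
      rcases this with h1 | h1 <;> simp [h1, bitMap, Nat.digitChar]

lemma zfill_digits (m : Nat) (n : Int) :
    PySem.Chars.zfill (binDigits m) n
      = List.replicate (n.toNat - (binDigits m).length) '0' ++ binDigits m := by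
  rw [PySem.Chars.zfill.eq_def]
  by_cases hn : n ≤ ((binDigits m).length : Int)
  · rw [if_pos hn]
    have : n.toNat - (binDigits m).length = 0 := by omega
    simp [this]
  · rw [if_neg hn]
    obtain ⟨c, rest, hc⟩ : ∃ c rest, binDigits m = c :: rest := by
      cases h : binDigits m with
      | nil => exact absurd h (binDigits_ne_nil m)
      | cons c rest => exact ⟨c, rest, rfl⟩
    have hmem := binDigits_mem m c (by rw [hc]; simp)
    rw [hc]
    have : ¬ (c = '+' ∨ c = '-') := by rcases hmem with rfl | rfl <;> simp
    simp [this]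

-- one row: A's string pipeline equals B's bit rendering, for 0 ≤ v
lemma row_eq (n v : Int) (hv : 0 ≤ v) :
    PySem.Chars.replace (PySem.Chars.replace
        (PySem.Chars.zfill
          (PySem.Chars.slice (PySem.Int.toBinChars0b v) (some 2) none) n) ['1'] ['#']) ['0'] [' ']
      = (bitsLSB v ++ List.replicate (max n 1 - ((bitsLSB v).length : Int)).toNat ' ').reverse := by
  obtain ⟨m, rfl⟩ : ∃ m : Nat, v = (m : Int) := ⟨v.toNat, (Int.toNat_of_nonneg hv).symm⟩
  have hslice : PySem.Chars.slice (PySem.Int.toBinChars0b (m : Int)) (some 2) none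
      = binDigits m := by
    rw [PySem.Int.toBinChars0b, if_neg (by omega)]
    rw [PySem.Chars.slice_eq_listSlice, PySem.List.slice_from _ (by norm_num)]
    simp [toDigits_two]
  rw [hslice, zfill_digits, replace_replace]
  rw [List.map_append, List.map_replicate]
  have hpad0 : bitMap '0' = ' ' := by simp [bitMap]
  rw [hpad0, List.reverse_append, List.reverse_replicate]
  by_cases hm : m = 0
  · subst hm
    rw [show ((0 : Nat) : Int) = (0 : Int) from rfl, bitsLSB_zero]
    have hb : binDigits 0 = ['0'] := by rw [binDigits]; norm_num [Nat.digitChar]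
    rw [hb]
    simp only [List.map_cons, List.map_nil, hpad0, List.length_cons, List.length_nil,
      List.reverse_nil, List.append_nil, Nat.cast_zero]
    rw [← List.replicate_succ']
    congr 1
    omega
  · rw [bitsLSB_eq m (by omega), List.reverse_reverse]
    congr 1
    rw [List.length_reverse, List.length_map]
    have hL := binDigits_length_pos m
    congr 1
    omega

-- both folds produce rows pairwise, so the per-row equality lifts to the whole answer
lemma foldl_rows {α : Type} (f g : α → List Char) (l : List α)
    (h : ∀ p ∈ l, f p = g p) :
    ∀ acc : List String,
      l.foldl (fun answer p => answer ++ [String.mk (f p)]) acc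
        = l.foldl (fun answer p => answer ++ [String.mk (g p)]) acc := by
  induction l with
  | nil => intro acc; rfl
  | cons p t ih =>
    intro acc
    simp only [List.foldl_cons]
    rw [h p (by simp), ih (fun q hq => h q (by simp [hq]))]

-- ===== VERDICT (by name: the statement is the Claim_ definition above) =====
theorem solution_spec : Claim_equal_solution := by
  intro n arr1 arr2 _ hpre
  show solution n arr1 arr2 = solution_alt n arr1 arr2
  unfold solution solution_alt
  apply foldl_rows
  intro p hp
  obtain ⟨h1, h2⟩ := hpre p hp
  exact row_eq n (PySem.Int.bor p.1 p.2) (by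
    rw [PySem.Int.bor]
    simp only [if_pos h1, if_pos h2]
    positivity)
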